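-- pv_equiv track=rewrite | github.com/radoskoppl/radoskop | scripts/build_metrics.py | split_sessions_by_kadencja
-- ===== SOURCE A (Python) =====
-- KADENCJE = [
--     {
--         "id": "2018-2023",
--         "label": "Kadencja 2018–2023",
--         "start": "2018-01-01",
--         "end": "2024-05-07",  # IX kadencja inauguracja: 7 maja 2024
--     },
--     {
--         "id": "2024-2029",
--         "label": "Kadencja 2024–2029",
--         "start": "2024-05-07",
--         "end": "2030-01-01",
--     },
-- ]
--
-- def split_sessions_by_kadencja(sessions):
--     """Split sessions into kadencje by date."""
--     result = {k["id"]: [] for k in KADENCJE}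
--     for s in sessions:
--         d = s.get("date", "")
--         if not d:
--             continue
--         for k in KADENCJE:
--             if k["start"] <= d < k["end"]:
--                 result[k["id"]].append(s)
--                 break
--     return result
-- ===== SOURCE B (Python) =====
-- KADENCJE = [
--     {
--         "id": "2018-2023",
--         "label": "Kadencja 2018–2023",
--         "start": "2018-01-01",
--         "end": "2024-05-07",  # IX kadencja inauguracja: 7 maja 2024
--     },
--     {
--         "id": "2024-2029",
--         "label": "Kadencja 2024–2029",
--         "start": "2024-05-07",
--         "end": "2030-01-01",
--     },
-- ]
--
-- def split_sessions_by_kadencja(sessions):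
--     """Split sessions into kadencje by date (inverted nesting: one filter pass per kadencja)."""
--     return {
--         k["id"]: [s for s in sessions
--                   if (d := s.get("date", "")) and k["start"] <= d < k["end"]]
--         for k in KADENCJE
--     }
-- ===== Notes on version B (the rewrite author's own statement) =====
-- stated objective: simpler
-- what changed: Inverts the loop nesting: instead of one pass over sessions with an inner first-match-and-break scan over KADENCJE mutating a result dict, B is a dict comprehension over KADENCJE whose bucket is an independent filter pass over sessions (equivalent because the half-open ranges are disjoint).
import Mathlib
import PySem

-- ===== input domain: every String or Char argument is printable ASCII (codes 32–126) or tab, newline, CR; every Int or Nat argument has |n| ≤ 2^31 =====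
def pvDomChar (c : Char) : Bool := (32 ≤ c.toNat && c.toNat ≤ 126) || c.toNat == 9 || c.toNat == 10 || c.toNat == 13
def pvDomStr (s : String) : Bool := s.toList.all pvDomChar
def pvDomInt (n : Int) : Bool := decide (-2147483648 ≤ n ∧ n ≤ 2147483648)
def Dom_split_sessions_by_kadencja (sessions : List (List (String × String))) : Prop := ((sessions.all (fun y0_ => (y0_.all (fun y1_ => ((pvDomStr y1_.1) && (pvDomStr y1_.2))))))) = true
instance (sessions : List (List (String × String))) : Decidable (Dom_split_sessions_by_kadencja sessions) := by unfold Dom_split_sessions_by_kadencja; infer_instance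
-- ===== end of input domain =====

-- B inverts the loop nesting: a dict comprehension over KADENCJE whose bucket is an
-- independent filter pass over sessions (equivalent since the half-open date ranges are disjoint).

-- the module constant KADENCJE (shared context of A and B)
def pvK1 : PySem.Dict String String :=
  PySem.Dict.ofList [("id", "2018-2023"), ("label", "Kadencja 2018–2023"),
    ("start", "2018-01-01"), ("end", "2024-05-07")]
def pvK2 : PySem.Dict String String :=
  PySem.Dict.ofList [("id", "2024-2029"), ("label", "Kadencja 2024–2029"),
    ("start", "2024-05-07"), ("end", "2030-01-01")]
def KADENCJE : List (PySem.Dict String String) := [pvK1, pvK2]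

-- s.get("date", "") on the association-list dict s (first match)
def sessionDate (s : List (String × String)) : String :=
  PySem.Dict.getD (PySem.Dict.mk s) "date" ""

-- ===== PORT A =====
-- inner 'for k in KADENCJE: … break' loop of A
def pvInnerA (r : PySem.Dict String (List (List (String × String))))
    (s : List (String × String)) (d : String) :
    List (PySem.Dict String String) → PySem.Dict String (List (List (String × String)))
  | [] => r
  | k :: ks =>
    if PySem.Dict.getD k "start" "" ≤ d ∧ d < PySem.Dict.getD k "end" "" then
      r.modify (PySem.Dict.getD k "id" "") [] (· ++ [s])
    else pvInnerA r s d ks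

def split_sessions_by_kadencja (sessions : List (List (String × String))) :
    List (String × List (List (String × String))) :=
  let result := KADENCJE.foldl
    (fun r k => r.insert (PySem.Dict.getD k "id" "") ([] : List (List (String × String))))
    PySem.Dict.empty
  (sessions.foldl
    (fun r s =>
      let d := sessionDate s
      if d = "" then r else pvInnerA r s d KADENCJE)
    result).items

-- ===== PORT B =====
def split_sessions_by_kadencja_alt (sessions : List (List (String × String))) :
    List (String × List (List (String × String))) :=
  (KADENCJE.foldl
    (fun r k =>
      r.insert (PySem.Dict.getD k "id" "")
        (sessions.filter (fun s =>
          let d := sessionDate s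
          decide (d ≠ "") && decide (PySem.Dict.getD k "start" "" ≤ d)
            && decide (d < PySem.Dict.getD k "end" ""))))
    PySem.Dict.empty).items

-- ===== PRECONDITION & SPEC =====
def Spec_split_sessions_by_kadencja (sessions : List (List (String × String))) (out : List (String × List (List (String × String)))) : Prop := out = split_sessions_by_kadencja_alt sessions
instance (sessions : List (List (String × String))) (out : List (String × List (List (String × String)))) : Decidable (Spec_split_sessions_by_kadencja sessions out) := by unfold Spec_split_sessions_by_kadencja; infer_instance

-- ===== CLAIM (what is proved, stated in full; the proofs are below) =====
def Claim_equal_split_sessions_by_kadencja : Prop := ∀ (sessions : List (List (String × String))), Dom_split_sessions_by_kadencja sessions → Spec_split_sessions_by_kadencja sessions (split_sessions_by_kadencja sessions)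

-- ===== LEMMAS AND PROOFS =====

theorem pvK1_id : pvK1.getD "id" "" = "2018-2023" := rfl
theorem pvK1_start : pvK1.getD "start" "" = "2018-01-01" := rfl
theorem pvK1_end : pvK1.getD "end" "" = "2024-05-07" := rfl
theorem pvK2_id : pvK2.getD "id" "" = "2024-2029" := rfl
theorem pvK2_start : pvK2.getD "start" "" = "2024-05-07" := rfl
theorem pvK2_end : pvK2.getD "end" "" = "2030-01-01" := rfl

-- the bucket predicates of B, as named Bool tests on a session
def pvP1 (s : List (String × String)) : Bool :=
  let d := sessionDate s
  decide (d ≠ "") && decide (("2018-01-01" : String) ≤ d) && decide (d < "2024-05-07")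

def pvP2 (s : List (String × String)) : Bool :=
  let d := sessionDate s
  decide (d ≠ "") && decide (("2024-05-07" : String) ≤ d) && decide (d < "2030-01-01")

-- the per-session step of A's outer loop on the two-bucket literal dict
theorem stepA_eq (l1 l2 : List (List (String × String))) (s : List (String × String)) :
    (if sessionDate s = "" then PySem.Dict.mk [("2018-2023", l1), ("2024-2029", l2)]
     else pvInnerA (PySem.Dict.mk [("2018-2023", l1), ("2024-2029", l2)]) s (sessionDate s) KADENCJE)
    = PySem.Dict.mk [("2018-2023", if pvP1 s then l1 ++ [s] else l1),
                     ("2024-2029", if pvP2 s then l2 ++ [s] else l2)] := by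
  unfold pvP1 pvP2
  generalize sessionDate s = d
  simp only [KADENCJE, pvInnerA, pvK1_id, pvK1_start, pvK1_end, pvK2_id, pvK2_start, pvK2_end]
  by_cases h0 : d = ""
  · simp [h0]
  · by_cases ha : ("2018-01-01" : String) ≤ d
    · by_cases hb : d < "2024-05-07"
      · have hc : ¬ ("2024-05-07" : String) ≤ d := not_le.mpr hb
        simp [h0, ha, hb, hc, PySem.Dict.modify, PySem.Dict.insert, PySem.Dict.contains,
          PySem.Dict.getD, PySem.Dict.get?]
      · by_cases hc : d < "2030-01-01"
        · have hd : ("2024-05-07" : String) ≤ d := not_lt.mp hb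
          simp [h0, ha, hb, hc, hd, PySem.Dict.modify, PySem.Dict.insert, PySem.Dict.contains,
            PySem.Dict.getD, PySem.Dict.get?]
        · simp [h0, ha, hb, hc]
    · have hb : ¬ ("2024-05-07" : String) ≤ d := by
        intro h
        refine ha (le_trans ?_ h)
        rw [String.le_iff_toList_le]; decide
      simp [h0, ha, hb]

-- A's outer loop, characterised on the two-bucket literal dict
theorem loopA_eq (sessions : List (List (String × String)))
    (l1 l2 : List (List (String × String))) :
    sessions.foldl
      (fun r s => let d := sessionDate s
                  if d = "" then r else pvInnerA r s d KADENCJE)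
      (PySem.Dict.mk [("2018-2023", l1), ("2024-2029", l2)])
    = PySem.Dict.mk [("2018-2023", l1 ++ sessions.filter pvP1),
                     ("2024-2029", l2 ++ sessions.filter pvP2)] := by
  induction sessions generalizing l1 l2 with
  | nil => simp
  | cons s t ih =>
    simp only [List.foldl_cons, List.filter_cons]
    rw [stepA_eq, ih]
    by_cases h1 : pvP1 s <;> by_cases h2 : pvP2 s <;> simp [h1, h2]

-- ===== VERDICT (by name: the statement is the Claim_ definition above) =====
theorem split_sessions_by_kadencja_spec : Claim_equal_split_sessions_by_kadencja := by
  intro sessions _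
  show split_sessions_by_kadencja sessions = split_sessions_by_kadencja_alt sessions
  have hinit : KADENCJE.foldl
      (fun r k => r.insert (PySem.Dict.getD k "id" "") ([] : List (List (String × String))))
      PySem.Dict.empty
      = PySem.Dict.mk [("2018-2023", []), ("2024-2029", [])] := by decide
  simp only [split_sessions_by_kadencja, split_sessions_by_kadencja_alt]
  rw [hinit, loopA_eq]
  simp only [KADENCJE, List.foldl_cons, List.foldl_nil, pvK1_id, pvK1_start, pvK1_end,
    pvK2_id, pvK2_start, pvK2_end]
  simp only [PySem.Dict.insert, PySem.Dict.contains, PySem.Dict.empty]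
  constructor
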